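-- pv_equiv track=rewrite | github.com/samr25/interviewGA | main.py | get_potential_words
-- ===== SOURCE A (Python) =====
-- import itertools
--
-- numbers_to_letters = {
--     '0': ['O'],
--     '1': ['I', 'L'],
--     '2': ['Z', 'R'],
--     '3': ['E'],
--     '4': ['A'],
--     '5': ['S'],
--     '6': ['B', 'G', 'C'],
--     '7': ['T', 'Y'],
--     '8': ['B'],
--     '9': ['G'],
-- }
--
-- def get_potential_words(hexcode_string):
--     """
--     Turns each number in the string into its translated letter. This is done for each combination of letter translations
--     :param hexcode_string: Single hexcode in string format
--
--     :return: List of all possible hexcode letter translations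
--     """
--     list_of_letter_options = []
--
--     for index in range(len(hexcode_string)):
--         try:
--             list_of_letter_options.append(numbers_to_letters[hexcode_string[index]])
--         except KeyError:
--             list_of_letter_options.append(hexcode_string[index].upper())
--
--     return list(itertools.product(*list_of_letter_options))
-- ===== SOURCE B (Python) =====
-- numbers_to_letters = {
--     '0': ['O'],
--     '1': ['I', 'L'],
--     '2': ['Z', 'R'],
--     '3': ['E'],
--     '4': ['A'],
--     '5': ['S'],
--     '6': ['B', 'G', 'C'],
--     '7': ['T', 'Y'],
--     '8': ['B'],
--     '9': ['G'],
-- }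
--
-- def get_potential_words(hexcode_string):
--     # Ranked (mixed-radix) enumeration: the k-th translation is obtained by
--     # decoding k into one digit per position (last position = least significant
--     # digit), so each output tuple is computed directly from its index instead
--     # of accumulating partial tuples; this yields itertools.product's order.
--     pools = [numbers_to_letters.get(c, c.upper()) for c in hexcode_string]
--     total = 1
--     for p in pools:
--         total *= len(p)
--     out = []
--     for k in range(total):
--         word = []
--         rem = k
--         for p in reversed(pools):
--             rem, d = divmod(rem, len(p))
--             word.append(p[d])
--         word.reverse()
--         out.append(tuple(word))
--     return out
-- ===== Notes on version B (the rewrite author's own statement) =====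
-- stated objective: alternative
-- what changed: B replaces itertools.product over collected option pools with ranked (mixed-radix) enumeration: it counts the total number of combinations and decodes each index k into one option per position via divmod, building every output tuple directly from its rank.
import Mathlib
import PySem

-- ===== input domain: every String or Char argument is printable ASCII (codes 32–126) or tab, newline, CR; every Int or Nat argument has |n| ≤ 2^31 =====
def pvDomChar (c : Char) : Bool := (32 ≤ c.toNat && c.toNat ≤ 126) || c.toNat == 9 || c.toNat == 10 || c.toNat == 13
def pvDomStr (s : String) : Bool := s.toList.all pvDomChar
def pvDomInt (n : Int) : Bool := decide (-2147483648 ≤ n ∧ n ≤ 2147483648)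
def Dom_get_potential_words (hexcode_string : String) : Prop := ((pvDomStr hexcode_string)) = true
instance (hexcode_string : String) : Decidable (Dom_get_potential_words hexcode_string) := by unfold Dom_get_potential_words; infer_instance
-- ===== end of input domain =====

-- B replaces itertools.product over collected option pools with ranked (mixed-radix)
-- enumeration: each output tuple is decoded directly from its index k by divmod;
-- objective: alternative algorithm, same cost.

-- module-level constant numbers_to_letters (shared context of both programs)
def numbersToLetters : PySem.Dict Char (List String) :=
  PySem.Dict.ofList [('0', ["O"]), ('1', ["I", "L"]), ('2', ["Z", "R"]), ('3', ["E"]),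
    ('4', ["A"]), ('5', ["S"]), ('6', ["B", "G", "C"]), ('7', ["T", "Y"]),
    ('8', ["B"]), ('9', ["G"])]

-- ===== PORT A =====
-- try: numbers_to_letters[c]  except KeyError: c.upper()  — the uppercased one-character
-- string is the pool itertools.product will iterate character by character, so it is
-- represented as the list of its characters as one-character strings (exact for any string).
def pvPoolA (c : Char) : List String :=
  match PySem.Dict.get? numbersToLetters c with
  | some l => l
  | none => (PySem.Chars.upper [c]).map (fun ch => String.ofList [ch])

-- itertools.product(*pools): ported by hand (no PySem primitive); exact — left-to-right
-- accumulation, the last pool varying fastest, [[]] for an empty pool list.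
def pvProduct (pools : List (List String)) : List (List String) :=
  pools.foldl (fun acc pool => acc.flatMap (fun t => pool.map (fun x => t ++ [x]))) [[]]

def get_potential_words (hexcode_string : String) : List (List String) :=
  let listOfLetterOptions :=
    (PySem.List.pyRange 0 (PySem.Str.len hexcode_string) 1).foldl
      (fun acc index => acc ++ [pvPoolA (PySem.List.pyGetD hexcode_string.toList index ' ')]) []
  pvProduct listOfLetterOptions

-- ===== PORT B =====
-- numbers_to_letters.get(ch, ch.upper()) (same representation of the fallback as in A's port)
def pvPoolB (c : Char) : List String :=
  match PySem.Dict.get? numbersToLetters c with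
  | some l => l
  | none => (PySem.Chars.upper [c]).map (fun ch => String.ofList [ch])

-- rem, d = divmod(rem, len(p)) is ported as floordiv/mod (exact: every pool is nonempty,
-- so len(p) ≠ 0 whenever the loop body runs in Python); p[d] with the in-range d → pyGetD.
def get_potential_words_alt (hexcode_string : String) : List (List String) :=
  let pools := hexcode_string.toList.map pvPoolB
  let total := pools.foldl (fun t p => t * (p.length : Int)) 1
  (PySem.List.pyRange 0 total 1).foldl (fun out k =>
    let st := pools.reverse.foldl
      (fun (st : List String × Int) p =>
        (st.1 ++ [PySem.List.pyGetD p (PySem.Int.mod st.2 (p.length : Int)) ""],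
         PySem.Int.floordiv st.2 (p.length : Int)))
      ([], k)
    out ++ [st.1.reverse]) []

-- ===== PRECONDITION & SPEC =====
def Spec_get_potential_words (hexcode_string : String) (out : List (List String)) : Prop := out = get_potential_words_alt hexcode_string
instance (hexcode_string : String) (out : List (List String)) : Decidable (Spec_get_potential_words hexcode_string out) := by unfold Spec_get_potential_words; infer_instance

-- ===== CLAIM (what is proved, stated in full; the proofs are below) =====
def Claim_equal_get_potential_words : Prop := ∀ (hexcode_string : String), Dom_get_potential_words hexcode_string → Spec_get_potential_words hexcode_string (get_potential_words hexcode_string)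

-- ===== LEMMAS AND PROOFS =====

-- proof helpers: the Cartesian product of a pool list, the number of its elements
-- (mixed radix), and the rank-decoding function
def pvProd (pools : List (List String)) : List (List String) :=
  match pools with
  | [] => [[]]
  | p :: ps => p.flatMap (fun x => (pvProd ps).map (fun t => x :: t))

def pvT (pools : List (List String)) : Nat :=
  match pools with
  | [] => 1
  | p :: ps => p.length * pvT ps

def pvDecode (pools : List (List String)) (k : Nat) : List String :=
  match pools with
  | [] => []
  | p :: ps => p.getD (k / pvT ps) "" :: pvDecode ps (k % pvT ps)

-- A's option-pool list is the per-character pool map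
theorem pools_eq (cs : List Char) :
    (PySem.List.pyRange 0 (cs.length : Int) 1).foldl
      (fun acc index => acc ++ [pvPoolA (PySem.List.pyGetD cs index ' ')]) []
      = cs.map pvPoolA := by
  rw [PySem.List.foldl_pyRange_zero_pyGetD' cs ' '
        (fun acc c => acc ++ [pvPoolA c]) []]
  simpa using PySem.List.foldl_append_singleton_eq_map (l := cs) (f := pvPoolA) (acc := ([] : List (List String)))

-- A's left-to-right product fold, from any accumulator, is the accumulator crossed with pvProd
theorem product_eq_prod (pools : List (List String)) (acc : List (List String)) :
    pools.foldl (fun acc pool => acc.flatMap (fun t => pool.map (fun x => t ++ [x]))) acc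
      = acc.flatMap (fun t => (pvProd pools).map (fun u => t ++ u)) := by
  induction pools generalizing acc with
  | nil => simp [pvProd]
  | cons p ps ih =>
    simp only [List.foldl_cons, ih, pvProd]
    simp [List.flatMap_map, List.map_flatMap, List.flatMap_assoc, List.map_map,
      Function.comp_def, List.append_assoc]

-- B's total-count fold is pvT
theorem total_eq (pools : List (List String)) (a : Int) :
    pools.foldl (fun t p => t * (p.length : Int)) a = a * (pvT pools : Int) := by
  induction pools generalizing a with
  | nil => simp [pvT]
  | cons p ps ih => simp [pvT, ih]; ring

-- B's inner divmod fold decodes the rank k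
theorem inner_eq (pools : List (List String)) (k : Nat) :
    pools.foldr
      (fun p (st : List String × Int) =>
        (st.1 ++ [PySem.List.pyGetD p (PySem.Int.mod st.2 (p.length : Int)) ""],
         PySem.Int.floordiv st.2 (p.length : Int)))
      (([] : List String), (k : Int))
      = ((pvDecode pools (k % pvT pools)).reverse, ((k / pvT pools : Nat) : Int)) := by
  induction pools generalizing k with
  | nil => simp [pvDecode, pvT]
  | cons p ps ih =>
    simp only [List.foldr_cons, ih, pvDecode, pvT]
    rw [PySem.Int.mod_natCast, PySem.Int.floordiv_natCast, PySem.List.pyGetD_natCast]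
    have h1 : k % (p.length * pvT ps) / pvT ps = k / pvT ps % p.length := by
      rw [Nat.mul_comm]
      exact Nat.mod_mul_right_div_self k (pvT ps) p.length
    have h2 : k % (p.length * pvT ps) % pvT ps = k % pvT ps :=
      Nat.mod_mod_of_dvd k ⟨p.length, Nat.mul_comm _ _⟩
    have h3 : k / pvT ps / p.length = k / (p.length * pvT ps) := by
      rw [Nat.div_div_eq_div_mul, Nat.mul_comm]
    rw [h1, h2, h3, List.reverse_cons]

-- range (m*n) enumerated as nested ranges (last index fastest)
theorem range_mul_flatMap (m n : Nat) :
    List.range (m * n) = (List.range m).flatMap (fun q => (List.range n).map (fun r => q * n + r)) := by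
  induction m with
  | zero => simp
  | succ m ih =>
    rw [Nat.succ_mul, List.range_add, ih, List.range_succ, List.flatMap_append]
    simp

-- the list obtained by indexing with every position is the list itself
theorem flatMap_range_getD (xs : List String) (f : String → List (List String)) :
    (List.range xs.length).flatMap (fun q => f (xs.getD q "")) = xs.flatMap f := by
  have h : (List.range xs.length).map (fun q => xs.getD q "") = xs := by
    apply List.ext_getElem
    · simp
    · intro i h1 h2
      simp only [List.getElem_map, List.getElem_range, List.getD_eq_getElem?_getD]
      rw [List.getElem?_eq_getElem h2]
      rfl
  calc (List.range xs.length).flatMap (fun q => f (xs.getD q ""))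
      = ((List.range xs.length).map (fun q => xs.getD q "")).flatMap f := by
        rw [List.flatMap_map]
    _ = xs.flatMap f := by rw [h]

-- flatMap respects pointwise equality on members
theorem flatMap_congr_mem {A B : Type} (l : List A) (f g : A -> List B)
    (h : forall a, a ∈ l -> f a = g a) : l.flatMap f = l.flatMap g := by
  induction l with
  | nil => rfl
  | cons x xs ih =>
    simp only [List.flatMap_cons]
    rw [h x (List.mem_cons_self), ih (fun a ha => h a (List.mem_cons_of_mem x ha))]

-- decoding every rank in order yields the Cartesian product
theorem enum_eq_prod (pools : List (List String)) :
    (List.range (pvT pools)).map (pvDecode pools) = pvProd pools := by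
  induction pools with
  | nil => simp [pvT, pvProd, pvDecode, List.range_succ]
  | cons p ps ih =>
    rw [show pvT (p :: ps) = p.length * pvT ps from rfl, range_mul_flatMap, List.map_flatMap]
    have h1 : forall q, q ∈ List.range p.length ->
        ((List.range (pvT ps)).map (fun r => q * pvT ps + r)).map (pvDecode (p :: ps))
          = (pvProd ps).map (fun t => p.getD q "" :: t) := by
      intro q hq
      rw [List.map_map]
      have hstep : forall r, r ∈ List.range (pvT ps) ->
          (pvDecode (p :: ps) ∘ fun r => q * pvT ps + r) r = (fun t => p.getD q "" :: t) (pvDecode ps r) := by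
        intro r hr
        have hrT := List.mem_range.mp hr
        have hT : 0 < pvT ps := by omega
        have hdiv : (q * pvT ps + r) / pvT ps = q := by
          rw [Nat.mul_comm q, Nat.mul_add_div hT, Nat.div_eq_of_lt hrT]
          omega
        have hmod : (q * pvT ps + r) % pvT ps = r := by
          rw [Nat.add_comm, Nat.add_mul_mod_self_right, Nat.mod_eq_of_lt hrT]
        simp only [Function.comp_apply, pvDecode, hdiv, hmod]
      rw [List.map_congr_left hstep, ← ih, List.map_map]
      rfl
    rw [flatMap_congr_mem _ _ _ h1]
    exact flatMap_range_getD p (fun x => (pvProd ps).map (fun t => x :: t))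

-- A computes the Cartesian product of its per-character pools
theorem a_eq_prod (s : String) : get_potential_words s = pvProd (s.toList.map pvPoolA) := by
  unfold get_potential_words pvProduct
  rw [show PySem.Str.len s = (s.toList.length : Int) from by simp [PySem.Str.len_eq],
    pools_eq s.toList, product_eq_prod]
  simp

-- B's ranked enumeration computes the same Cartesian product
theorem b_eq_prod (s : String) : get_potential_words_alt s = pvProd (s.toList.map pvPoolB) := by
  simp only [get_potential_words_alt]
  rw [total_eq, one_mul, PySem.List.pyRange_zero_natCast,
    PySem.List.foldl_append_singleton_eq_map, List.nil_append, List.map_map]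
  rw [← enum_eq_prod]
  apply List.map_congr_left
  intro k hk
  have hkT := List.mem_range.mp hk
  simp only [Function.comp_apply, List.foldl_reverse]
  have h := inner_eq (s.toList.map pvPoolB) k
  rw [show (List.foldr (fun p (st : List String × Int) =>
        (st.1 ++ [PySem.List.pyGetD p (PySem.Int.mod st.2 (p.length : Int)) ""],
         PySem.Int.floordiv st.2 (p.length : Int))) ([], (k : Int)) (s.toList.map pvPoolB)).1
      = ((pvDecode (s.toList.map pvPoolB) (k % pvT (s.toList.map pvPoolB))).reverse) from by rw [h]]
  rw [Nat.mod_eq_of_lt hkT, List.reverse_reverse]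

-- ===== VERDICT (by name: the statement is the Claim_ definition above) =====
theorem get_potential_words_spec : Claim_equal_get_potential_words := by
  intro s _
  unfold Spec_get_potential_words
  rw [a_eq_prod, b_eq_prod]
  rfl
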